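-- pv_equiv track=rewrite | github.com/Kristal1ik/Programming-IU7 | labs/12_word_processor/words.py | find_the_sentence_with_the_shortest_word
-- ===== SOURCE A (Python) =====
-- def find_the_sentence_with_the_shortest_word(text):
--     min_sentence_index = -1
--     shortest_word = None
--     flag_whitespace = False
--     sentences = []
--     signs = ".!?"
--     current_sentence = ""
--     for i in range(len(text)):
--         string = text[i]
--
--         if flag_whitespace:
--             string = " " + string
--         for j in range(len(string)):
--             char = string[j]
--             if j == len(string) - 1 and char not in signs:
--                 flag_whitespace = True
--             if char in signs:
--                 sentences.append(current_sentence)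
--                 current_sentence = ""
--             else:
--                 current_sentence += char
--
--     for index, sentence in enumerate(sentences):
--         words = []
--         current_word = ""
--
--         # Извлекаем слова из текущего предложения
--         for char in sentence:
--             if char.isalnum() or char in '+*':
--                 current_word += char  # Собираем текущее слово
--             else:
--                 if current_word:  # Если текущее слово не пустое
--                     words.append(current_word)
--                     current_word = ""
--
--         # Добавляем последнее слово, если оно есть
--         if current_word:
--             words.append(current_word)
--
--         # Проверяем каждое слово в текущем предложении
--         for word in words:
--             if shortest_word is None or len(word) < len(shortest_word):
--                 shortest_word = word
--                 min_sentence_index = index  # Сохраняем индекс текущего предложения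
--
--     return min_sentence_index, shortest_word
-- ===== SOURCE B (Python) =====
-- def find_the_sentence_with_the_shortest_word(text):
--     signs = ".!?"
--     best_index, best_word = -1, None
--     seg_best = None
--     seg = 0
--     word = ""
--     sep = False
--     for s in text:
--         stream = (" " + s) if sep else s
--         if stream and stream[-1] not in signs:
--             sep = True
--         for ch in stream:
--             if ch in signs:
--                 if word:
--                     if seg_best is None or len(word) < len(seg_best):
--                         seg_best = word
--                     word = ""
--                 if seg_best is not None and (best_word is None or len(seg_best) < len(best_word)):
--                     best_index, best_word = seg, seg_best
--                 seg_best = None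
--                 seg += 1
--             elif ch.isalnum() or ch in '+*':
--                 word += ch
--             elif word:
--                 if seg_best is None or len(word) < len(seg_best):
--                     seg_best = word
--                 word = ""
--     return best_index, best_word
-- ===== Notes on version B (the rewrite author's own statement) =====
-- stated objective: simpler
-- what changed: A builds a list of sentences, then per sentence a list of words, then scans all words for the minimum; B is a single streaming pass over the characters that keeps only the current word, the current segment's best word and the global best, committing the segment best at each sentence terminator, with no intermediate sentence/word lists.
import Mathlib
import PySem

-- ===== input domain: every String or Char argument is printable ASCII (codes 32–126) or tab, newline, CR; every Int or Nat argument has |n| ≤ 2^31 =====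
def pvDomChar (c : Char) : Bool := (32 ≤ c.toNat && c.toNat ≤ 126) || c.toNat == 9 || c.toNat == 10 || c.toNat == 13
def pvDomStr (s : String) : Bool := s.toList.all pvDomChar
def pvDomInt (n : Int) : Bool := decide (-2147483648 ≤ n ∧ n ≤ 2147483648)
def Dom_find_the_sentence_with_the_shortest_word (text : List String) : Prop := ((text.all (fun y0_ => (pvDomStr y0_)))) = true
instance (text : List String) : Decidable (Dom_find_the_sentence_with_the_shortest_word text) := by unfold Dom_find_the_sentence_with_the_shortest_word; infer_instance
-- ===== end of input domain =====

-- B replaces A's three-phase pipeline (build sentence list, then per sentence build a word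
-- list, then scan) by ONE streaming pass over the characters keeping only the current word,
-- the current segment's best and the global best (objective: simpler, no intermediate lists).

-- shared literal constants of both Pythons: signs ".!?" and the word predicate
def pvIsSign (c : Char) : Bool := c = '.' || c = '!' || c = '?'
def pvIsWord (c : Char) : Bool := PySem.Chars.isalnum c || c = '+' || c = '*'

-- ===== PORT A =====
-- phase-1 inner loop: `for j in range(len(string))` (flag set at the last index)
def pvAChars : List Char → List (List Char) × List Char × Bool → List (List Char) × List Char × Bool
  | [], st => st
  | c :: rest, (sents, cur, flag) =>
    let flag := if rest = [] ∧ ¬ pvIsSign c then true else flag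
    if pvIsSign c then pvAChars rest (sents ++ [cur], [], flag)
    else pvAChars rest (sents, cur ++ [c], flag)

-- phase-2 word extraction of one sentence (`words`, `current_word` accumulators)
def pvAExtract : List Char → List Char → List (List Char) → List (List Char)
  | [], cur, ws => if cur = [] then ws else ws ++ [cur]
  | c :: rest, cur, ws =>
    if pvIsWord c then pvAExtract rest (cur ++ [c]) ws
    else if cur = [] then pvAExtract rest [] ws else pvAExtract rest [] (ws ++ [cur])

-- `if shortest_word is None or len(word) < len(shortest_word)`
def pvAUpd (idx : Int) (g : Int × Option (List Char)) (w : List Char) : Int × Option (List Char) :=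
  match g.2 with
  | none => (idx, some w)
  | some b => if w.length < b.length then (idx, some w) else g

-- `for index, sentence in enumerate(sentences): … for word in words: …`
def pvAScan : List (List Char) → Int → Int × Option (List Char) → Int × Option (List Char)
  | [], _, g => g
  | s :: rest, idx, g => pvAScan rest (idx + 1) ((pvAExtract s [] []).foldl (pvAUpd idx) g)

def find_the_sentence_with_the_shortest_word (text : List String) : Int × Option String :=
  let st := text.foldl (fun st s => pvAChars (if st.2.2 then ' ' :: s.toList else s.toList) st)
      ([], [], false)
  let g := pvAScan st.1 0 (-1, none)
  (g.1, g.2.map String.ofList)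

-- ===== PORT B =====
-- B's state: ((best_index, best_word), seg_best, seg, word)
def pvBSt : Type := (Int × Option (List Char)) × Option (List Char) × Int × List Char

-- `if seg_best is None or len(word) < len(seg_best): seg_best = word`
def pvBMin (sb : Option (List Char)) (w : List Char) : Option (List Char) :=
  match sb with
  | none => some w
  | some m => if w.length < m.length then some w else sb

def pvBStep (st : pvBSt) (c : Char) : pvBSt :=
  let ((bi, bw), sb, seg, w) := st
  if pvIsSign c then
    let sb := if w = [] then sb else pvBMin sb w
    let g : Int × Option (List Char) :=
      match sb with
      | none => (bi, bw)
      | some m =>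
        match bw with
        | none => (seg, some m)
        | some b => if m.length < b.length then (seg, some m) else (bi, bw)
    (g, none, seg + 1, [])
  else if pvIsWord c then ((bi, bw), sb, seg, w ++ [c])
  else if w = [] then ((bi, bw), sb, seg, w)
  else ((bi, bw), pvBMin sb w, seg, [])

-- `if stream and stream[-1] not in signs: sep = True`
def pvSepNext (sep : Bool) (t : List Char) : Bool :=
  match t.getLast? with
  | none => sep
  | some c => if pvIsSign c then sep else true

def find_the_sentence_with_the_shortest_word_alt (text : List String) : Int × Option String :=
  let r := text.foldl
    (fun (acc : pvBSt × Bool) s =>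
      let t := if acc.2 then ' ' :: s.toList else s.toList
      (t.foldl pvBStep acc.1, pvSepNext acc.2 t))
    ((((-1 : Int), none), none, 0, []), false)
  (r.1.1.1, r.1.1.2.map String.ofList)

-- ===== PRECONDITION & SPEC =====
def Spec_find_the_sentence_with_the_shortest_word (text : List String) (out : Int × Option String) : Prop := out = find_the_sentence_with_the_shortest_word_alt text
instance (text : List String) (out : Int × Option String) : Decidable (Spec_find_the_sentence_with_the_shortest_word text out) := by unfold Spec_find_the_sentence_with_the_shortest_word; infer_instance

-- ===== CLAIM (what is proved, stated in full; the proofs are below) =====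
def Claim_equal_find_the_sentence_with_the_shortest_word : Prop := ∀ (text : List String), Dom_find_the_sentence_with_the_shortest_word text → Spec_find_the_sentence_with_the_shortest_word text (find_the_sentence_with_the_shortest_word text)

-- ===== LEMMAS AND PROOFS =====

-- the character stream both programs effectively consume (elements space-joined by the flag)
def pvStream : Bool → List String → List Char
  | _, [] => []
  | sep, s :: rest =>
    let t := if sep then ' ' :: s.toList else s.toList
    t ++ pvStream (pvSepNext sep t) rest

-- the final flag value (only needed to state the two phase lemmas)
def pvSepFin : Bool → List String → Bool
  | sep, [] => sep
  | sep, s :: rest =>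
    let t := if sep then ' ' :: s.toList else s.toList
    pvSepFin (pvSepNext sep t) rest

-- A's phase-1 per-char action, as a plain foldl step
def pvSplitStep (st : List (List Char) × List Char) (c : Char) : List (List Char) × List Char :=
  if pvIsSign c then (st.1 ++ [st.2], []) else (st.1, st.2 ++ [c])

-- B's non-sign handling on (seg_best, word) only
def pvWStep (p : Option (List Char) × List Char) (c : Char) : Option (List Char) × List Char :=
  if pvIsWord c then (p.1, p.2 ++ [c])
  else if p.2 = [] then p
  else (pvBMin p.1 p.2, [])

lemma pvAChars_eq (t : List Char) : ∀ sents cur flag,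
    pvAChars t (sents, cur, flag) =
      ((t.foldl pvSplitStep (sents, cur)).1, (t.foldl pvSplitStep (sents, cur)).2,
        pvSepNext flag t) := by
  induction t with
  | nil => intro sents cur flag; simp [pvAChars, pvSepNext]
  | cons c rest ih =>
    intro sents cur flag
    by_cases hr : rest = []
    · subst hr
      by_cases hs : pvIsSign c <;>
        simp [pvAChars, hs, pvSepNext, pvSplitStep]
    · have hlast : (c :: rest).getLast? = rest.getLast? := by
        cases rest with
        | nil => exact absurd rfl hr
        | cons d ds => simp [List.getLast?]
      by_cases hs : pvIsSign c <;>
        simp [pvAChars, hs, hr, ih, pvSepNext, hlast, pvSplitStep]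

lemma pvAPhase1_eq (text : List String) : ∀ sents cur flag,
    text.foldl (fun st s => pvAChars (if st.2.2 then ' ' :: s.toList else s.toList) st)
        (sents, cur, flag) =
      (((pvStream flag text).foldl pvSplitStep (sents, cur)).1,
        ((pvStream flag text).foldl pvSplitStep (sents, cur)).2, pvSepFin flag text) := by
  induction text with
  | nil => intro sents cur flag; simp [pvStream, pvSepFin]
  | cons s rest ih =>
    intro sents cur flag
    simp only [List.foldl_cons, pvAChars_eq, pvStream, pvSepFin, List.foldl_append]
    cases flag <;> simp [ih]

lemma pvBPhase_eq (text : List String) : ∀ (st : pvBSt) sep,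
    text.foldl
        (fun (acc : pvBSt × Bool) s =>
          let t := if acc.2 then ' ' :: s.toList else s.toList
          (t.foldl pvBStep acc.1, pvSepNext acc.2 t))
        (st, sep) =
      ((pvStream sep text).foldl pvBStep st, pvSepFin sep text) := by
  induction text with
  | nil => intro st sep; simp [pvStream, pvSepFin]
  | cons s rest ih =>
    intro st sep
    simp [pvStream, pvSepFin, List.foldl_append, ih]

lemma pvSplit_acc (cs : List Char) : ∀ sents cur,
    cs.foldl pvSplitStep (sents, cur) =
      (sents ++ (cs.foldl pvSplitStep ([], cur)).1, (cs.foldl pvSplitStep ([], cur)).2) := by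
  induction cs with
  | nil => intro sents cur; simp
  | cons c rest ih =>
    intro sents cur
    by_cases hs : pvIsSign c = true
    · simp only [List.foldl_cons, pvSplitStep, if_pos hs, List.nil_append]
      rw [ih (sents ++ [cur]) [], ih [cur] []]
      simp
    · simp only [List.foldl_cons, pvSplitStep, if_neg hs]
      exact ih sents (cur ++ [c])

lemma pvAExtract_acc (cs : List Char) : ∀ cur ws,
    pvAExtract cs cur ws = ws ++ pvAExtract cs cur [] := by
  induction cs with
  | nil => intro cur ws; by_cases h : cur = [] <;> simp [pvAExtract, h]
  | cons c rest ih =>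
    intro cur ws
    by_cases hw : pvIsWord c = true
    · simp only [pvAExtract, if_pos hw]
      exact ih (cur ++ [c]) ws
    · by_cases hc : cur = []
      · simp only [pvAExtract, if_neg hw, if_pos hc]
        exact ih [] ws
      · simp only [pvAExtract, if_neg hw, if_neg hc, List.nil_append]
        rw [ih [] (ws ++ [cur]), ih [] [cur]]
        simp

-- min-fold over A's word list = B's streaming (seg_best, word) state, closed at a sign
lemma pvClose_eq (cs : List Char) : ∀ sb w,
    (if (cs.foldl pvWStep (sb, w)).2 = [] then (cs.foldl pvWStep (sb, w)).1
      else pvBMin (cs.foldl pvWStep (sb, w)).1 (cs.foldl pvWStep (sb, w)).2) =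
      (pvAExtract cs w []).foldl pvBMin sb := by
  induction cs with
  | nil => intro sb w; by_cases h : w = [] <;> simp [pvAExtract, h]
  | cons c rest ih =>
    intro sb w
    by_cases hw : pvIsWord c = true
    · simp only [List.foldl_cons, pvWStep, if_pos hw, pvAExtract]
      exact ih sb (w ++ [c])
    · by_cases hc : w = []
      · simp only [List.foldl_cons, pvWStep, if_neg hw, pvAExtract, hc, if_pos]
        exact ih sb []
      · simp only [List.foldl_cons, pvWStep, if_neg hw, if_neg hc, pvAExtract, List.nil_append]
        rw [pvAExtract_acc, List.foldl_append]
        simp only [List.foldl_cons, List.foldl_nil]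
        exact ih (pvBMin sb w) []

-- commit of an Option best = A's word update
def pvCommit (idx : Int) (g : Int × Option (List Char)) : Option (List Char) → Int × Option (List Char)
  | none => g
  | some m =>
    match g.2 with
    | none => (idx, some m)
    | some b => if m.length < b.length then (idx, some m) else g

lemma pvMin_some (ws : List (List Char)) : ∀ w,
    ws.foldl pvBMin (some w) =
      match ws.foldl pvBMin none with
      | none => some w
      | some m => if m.length < w.length then some m else some w := by
  induction ws with
  | nil => intro w; simp
  | cons u ws ih =>
    intro w
    simp only [List.foldl_cons, pvBMin]
    by_cases hlt : u.length < w.length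
    · rw [if_pos hlt, ih u]
      rcases h : ws.foldl pvBMin none with _ | m
      · simp [hlt]
      · by_cases h2 : m.length < u.length <;> simp only [h2, if_pos, if_false] <;>
          split_ifs <;> first | rfl | omega
    · rw [if_neg hlt, ih w, ih u]
      rcases h : ws.foldl pvBMin none with _ | m
      · simp [hlt]
      · by_cases h2 : m.length < u.length <;> simp only [h2, if_pos, if_false] <;>
          split_ifs <;> first | rfl | omega

lemma pvFoldUpd_eq (idx : Int) (ws : List (List Char)) : ∀ g,
    ws.foldl (pvAUpd idx) g = pvCommit idx g (ws.foldl pvBMin none) := by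
  induction ws with
  | nil => intro g; simp [pvCommit]
  | cons w ws ih =>
    intro g
    simp only [List.foldl_cons]
    rw [ih, show pvBMin none w = some w from rfl, pvMin_some]
    rcases g with ⟨i, _ | b⟩ <;> rcases h : ws.foldl pvBMin none with _ | m
    · rfl
    · by_cases h1 : m.length < w.length <;>
        simp [pvAUpd, pvCommit, h1]
    · by_cases h1 : w.length < b.length <;>
        simp [pvAUpd, pvCommit, h1]
    · by_cases h1 : w.length < b.length <;> by_cases h2 : m.length < w.length <;>
        by_cases h3 : m.length < b.length <;>
        simp only [pvAUpd, pvCommit, h1, h2, h3, if_false, if_pos] <;> first | rfl | omega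

-- the core lemma: B's streaming pass computes A's scan over the split segments
lemma pvCore (cs : List Char) : ∀ (cur : List Char) (g : Int × Option (List Char)) (seg : Int),
    pvAScan ((cs.foldl pvSplitStep ([], cur)).1) seg g =
      (cs.foldl pvBStep
          (g, (cur.foldl pvWStep (none, [])).1, seg, (cur.foldl pvWStep (none, [])).2)).1 := by
  induction cs with
  | nil => intro cur g seg; simp [pvAScan]
  | cons c cs ih =>
    intro cur g seg
    by_cases hs : pvIsSign c = true
    · simp only [List.foldl_cons, pvSplitStep, if_pos hs]
      rw [pvSplit_acc]
      simp only [List.nil_append, List.singleton_append, pvAScan, pvBStep, if_pos hs]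
      rw [pvFoldUpd_eq, ← pvClose_eq cur none []]
      have h2 := ih []
        (pvCommit seg g
          (if (cur.foldl pvWStep (none, [])).2 = [] then (cur.foldl pvWStep (none, [])).1
            else pvBMin (cur.foldl pvWStep (none, [])).1 (cur.foldl pvWStep (none, [])).2))
        (seg + 1)
      simp only [List.foldl_nil] at h2
      rw [h2]
      rcases hq : (if (cur.foldl pvWStep (none, [])).2 = [] then (cur.foldl pvWStep (none, [])).1
          else pvBMin (cur.foldl pvWStep (none, [])).1 (cur.foldl pvWStep (none, [])).2)
        with _ | m <;>
        rcases g with ⟨i, _ | b⟩ <;> simp [pvCommit]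
    · simp only [List.foldl_cons, pvSplitStep, if_neg hs]
      rw [ih (cur ++ [c]) g seg, List.foldl_append, List.foldl_cons, List.foldl_nil]
      by_cases hw : pvIsWord c = true
      · simp [pvWStep, pvBStep, if_neg hs, hw]
      · by_cases hc : (cur.foldl pvWStep (none, ([] : List Char))).2 = [] <;>
          simp [pvWStep, pvBStep, if_neg hs, hw, hc]

-- ===== VERDICT (by name: the statement is the Claim_ definition above) =====
theorem find_the_sentence_with_the_shortest_word_spec : Claim_equal_find_the_sentence_with_the_shortest_word := by
  intro text _
  unfold Spec_find_the_sentence_with_the_shortest_word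
  unfold find_the_sentence_with_the_shortest_word find_the_sentence_with_the_shortest_word_alt
  rw [pvBPhase_eq]
  rw [pvAPhase1_eq text [] [] false]
  dsimp only
  have h2 := pvCore (pvStream false text) [] (-1, none) 0
  simp only [List.foldl_nil] at h2
  rw [h2]
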